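-- pv_equiv track=rewrite | github.com/domyg/Information-Theory-and-Data-Compression | Script Python/StringAttractor.py | isAttractor
-- ===== SOURCE A (Python) =====
-- def generate_substring(T):
--
--     subs = []
--
--     # Genero l'insieme di tutte le possibili sottostringhe di 'T'
--     for i in range(0, len(T)):
--         for j in range(i, len(T)):
--             if T[i:j+1] not in subs:
--                 subs.append((T[i:j+1]))
--
--     return subs
--
-- def isAttractor(T: str, Gamma):
--
--     # Genero, innanzitutto, l'insieme di tutte le possibili sottostringhe di T
--     subs = generate_substring(T)
--
--     dict = {}
--
--     # Per ogni sottostringa generata, ne conto le occorrenze e, per ognuna di queste, memorizzo gli indici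
--     # che la delimitano all'interno del testo 'T'
--     for sub in subs:
--         sub_count = T.count(sub)
--         indexes = []
--         start = 0
--         end = 0
--
--         # Itero tra le occorrenze di 'sub' in 'T' e, per ognuna, calcolo l'indice iniziale e quello che segue
--         # immediatamente tale occorrenza
--         for i in range(sub_count):
--             start = T.index(sub, end)
--             end = start + len(sub)
--
--             # Tramite questo ciclo aggiungo il valore degli indici compresi tra 'start' ed 'end' che
--             # delimitano la i-esima occorrenza della sottostringa nel testo 'T'
--
--             for j in range(start, end):
--                 indexes.append(str(j))
--
--
--         # Sfrutto un dizionario per memorizzare tutti gli indici che compongono 'sub' nel testo 'T'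
--         dict[sub] = indexes
--
--     # Estraggo le chiavi del dizionario; ovvero, estraggo la lista di sottostringhe individuate
--     keys = dict.keys()
--
--     is_attractor = True
--
--     # Per ogni sottostringa memorizzata nel dizionario, verifico se esiste un range di indici tale da
--     # contenere almeno uno tra gli indici 'j_k' di Gamma
--     for k in keys:
--         check = False
--         for g in Gamma:
--             if str(g) in dict[k]:
--                 check = True
--
--             if check == True:
--                 break
--
--         # Gamma è uno String Attractor se, per ogni sottostringa 'k', esiste una coppia di indici che ne
--         # delimita un'occorrenza tale per cui 'g' appartiene al range delimitato da tale coppia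
--         is_attractor = is_attractor and check
--
--         # Se per una qualunque sottosringa 'k' la suddetta condizione non dovesse verificarsi
--         # si potrebbe concludere che la sequenza proposta non è uno String Attractor per il testo T
--         if not is_attractor:
--             break
--
--     return is_attractor
-- ===== SOURCE B (Python) =====
-- def _covered(T, s, Gamma, pos):
--     # greedy non-overlapping occurrences of s in T starting at pos, matching
--     # the occurrence set A walks with count/index
--     p = T.find(s, pos)
--     if p == -1:
--         return False
--     if any(p <= g < p + len(s) for g in Gamma):
--         return True
--     return _covered(T, s, Gamma, p + len(s))
--
-- def isAttractor(T: str, Gamma):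
--     n = len(T)
--     seen = set()
--     for i in range(n):
--         for j in range(i + 1, n + 1):
--             s = T[i:j]
--             if s not in seen:
--                 seen.add(s)
--                 if not _covered(T, s, Gamma, 0):
--                     return False
--     return True
-- ===== Notes on version B (the rewrite author's own statement) =====
-- stated objective: faster
-- what changed: B drops A's materialised substring list, stringified-index dictionary and per-substring count()/index() passes: it enumerates substrings once with a seen-set, and checks each new substring by jumping through its greedy occurrences with find() and comparing Gamma against integer index intervals, returning False at the first uncovered substring.
import Mathlib
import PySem

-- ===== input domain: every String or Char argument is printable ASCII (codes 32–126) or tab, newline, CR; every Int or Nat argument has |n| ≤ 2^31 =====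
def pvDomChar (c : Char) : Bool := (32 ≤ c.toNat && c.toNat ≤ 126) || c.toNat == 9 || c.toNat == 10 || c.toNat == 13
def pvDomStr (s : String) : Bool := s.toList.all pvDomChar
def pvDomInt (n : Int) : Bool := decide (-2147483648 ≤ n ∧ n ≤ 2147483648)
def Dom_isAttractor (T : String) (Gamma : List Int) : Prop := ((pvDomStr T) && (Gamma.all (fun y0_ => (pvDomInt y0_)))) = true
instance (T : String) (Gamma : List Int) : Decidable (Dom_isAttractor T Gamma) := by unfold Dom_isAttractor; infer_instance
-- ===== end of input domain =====

-- B replaces A's enumerate-all-substrings + stringified-index dictionary with a single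
-- dedup-as-you-go scan that checks each distinct substring by jumping between its greedy
-- occurrences with find and comparing Gamma against integer intervals (objective: faster).

-- ===== PORT A =====
-- generate_substring(T): all distinct substrings, first-occurrence order
def pvGenSubs (t : List Char) : List (List Char) :=
  (PySem.List.pyRange 0 (t.length : Int) 1).foldl (fun subs i =>
    (PySem.List.pyRange i (t.length : Int) 1).foldl (fun subs j =>
      let sl := PySem.List.slice t (some i) (some (j + 1))
      if subs.contains sl then subs else subs ++ [sl]) subs) []

-- the per-substring loop of A: count occurrences, then for each occurrence append str(j)
-- for every index j it covers.  T.index(sub, end) is ported by findFrom; for every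
-- iteration i < T.count(sub) the Python index() call succeeds, so findFrom never yields -1 here.
def pvBuildIdx (t sub : List Char) : List String :=
  ((PySem.List.pyRange 0 (PySem.Chars.count t sub : Int) 1).foldl
    (fun (st : Int × Int × List String) _ =>
      let start := PySem.Chars.findFrom t sub st.2.1 none
      let end_ := start + (sub.length : Int)
      (start, end_, st.2.2 ++ (PySem.List.pyRange start end_ 1).map (fun j => PySem.Int.toStr j)))
    ((0 : Int), (0 : Int), ([] : List String))).2.2

def pvDict (t : List Char) (subs : List (List Char)) : PySem.Dict (List Char) (List String) :=
  subs.foldl (fun d sub => d.insert sub (pvBuildIdx t sub)) PySem.Dict.empty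

-- inner loop over Gamma: set check on membership, break as soon as check is True
def pvCheck (idx : List String) : List Int → Bool
  | [] => false
  | g :: gs => if idx.contains (PySem.Int.toStr g) then true else pvCheck idx gs

-- outer loop over the dict's keys with early break; dict[k] is ported by getD with an
-- unreachable default: every key iterated over is present in the dict.
def pvOuter (d : PySem.Dict (List Char) (List String)) (Gamma : List Int) :
    List (List Char) → Bool → Bool
  | [], acc => acc
  | k :: ks, acc =>
    let check := pvCheck (d.getD k []) Gamma
    let acc' := acc && check
    if acc' then pvOuter d Gamma ks acc' else acc'

def isAttractor (T : String) (Gamma : List Int) : Bool :=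
  let t := T.toList
  let d := pvDict t (pvGenSubs t)
  pvOuter d Gamma d.keys true

-- ===== PORT B =====
-- _covered(T, s, Gamma, pos): jump through the greedy occurrences of s via find.
-- fuel makes the recursion structural; t.length + 1 is always enough (s is nonempty,
-- so each jump advances pos), so the fuel-0 branch is unreachable from isAttractor_alt.
def pvbCovered (t s : List Char) (Gamma : List Int) : Nat → Nat → Bool
  | _, 0 => false
  | pos, fuel+1 =>
    let p := PySem.Chars.findFrom t s (pos : Int) none
    if p = -1 then false
    else if Gamma.any (fun g => decide (p ≤ g ∧ g < p + (s.length : Int))) then true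
    else pvbCovered t s Gamma (p.toNat + s.length) fuel

-- inner j-loop: skip substrings already seen, otherwise record and test; none = "return False"
def pvbInner (t : List Char) (Gamma : List Int) (i : Int) :
    List Int → PySem.Set (List Char) → Option (PySem.Set (List Char))
  | [], seen => some seen
  | j :: js, seen =>
    let s := PySem.List.slice t (some i) (some j)
    if PySem.Set.contains seen s then pvbInner t Gamma i js seen
    else
      let seen' := PySem.Set.add seen s
      if pvbCovered t s Gamma 0 (t.length + 1) then pvbInner t Gamma i js seen'
      else none

def pvbOuter (t : List Char) (Gamma : List Int) :
    List Int → PySem.Set (List Char) → Bool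
  | [], _ => true
  | i :: is', seen =>
    match pvbInner t Gamma i (PySem.List.pyRange (i + 1) ((t.length : Int) + 1) 1) seen with
    | none => false
    | some seen' => pvbOuter t Gamma is' seen'

def isAttractor_alt (T : String) (Gamma : List Int) : Bool :=
  let t := T.toList
  pvbOuter t Gamma (PySem.List.pyRange 0 (t.length : Int) 1) PySem.Set.empty

-- ===== PRECONDITION & SPEC =====
def Spec_isAttractor (T : String) (Gamma : List Int) (out : Bool) : Prop := out = isAttractor_alt T Gamma
instance (T : String) (Gamma : List Int) (out : Bool) : Decidable (Spec_isAttractor T Gamma out) := by unfold Spec_isAttractor; infer_instance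

-- ===== CLAIM (what is proved, stated in full; the proofs are below) =====
def Claim_equal_isAttractor : Prop := ∀ (T : String) (Gamma : List Int), Dom_isAttractor T Gamma → Spec_isAttractor T Gamma (isAttractor T Gamma)

-- ===== LEMMAS AND PROOFS =====

/- ---------- str(n) is injective ---------- -/

theorem pvTdcAppend (b f : Nat) : ∀ (n : Nat) (acc : List Char),
    Nat.toDigitsCore b f n acc = Nat.toDigitsCore b f n [] ++ acc := by
  induction f with
  | zero => intro n acc; simp [Nat.toDigitsCore]
  | succ f ih =>
    intro n acc
    simp only [Nat.toDigitsCore]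
    by_cases h : n / b = 0
    · simp [h]
    · simp only [h, if_false]
      rw [ih (n / b) (Nat.digitChar (n % b) :: acc), ih (n / b) [Nat.digitChar (n % b)]]
      simp

theorem pvTdcFuel : ∀ (n f f' : Nat), n < f → n < f' → ∀ acc,
    Nat.toDigitsCore 10 f n acc = Nat.toDigitsCore 10 f' n acc := by
  intro n
  induction n using Nat.strong_induction_on with
  | _ n ih =>
    intro f f' hf hf' acc
    obtain ⟨g, rfl⟩ : ∃ g, f = g + 1 := ⟨f - 1, by omega⟩
    obtain ⟨g', rfl⟩ : ∃ g', f' = g' + 1 := ⟨f' - 1, by omega⟩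
    simp only [Nat.toDigitsCore]
    by_cases h : n / 10 = 0
    · simp [h]
    · simp only [h, if_false]
      have hn : 0 < n := by
        rcases Nat.eq_zero_or_pos n with h0 | h0
        · exfalso; subst h0; simp at h
        · exact h0
      have hlt : n / 10 < n := Nat.div_lt_self hn (by omega)
      exact ih (n / 10) hlt g g' (by omega) (by omega) _

def pvTD (n : Nat) : List Char := Nat.toDigits 10 n

theorem pvTD_small {n : Nat} (h : n < 10) : pvTD n = [Nat.digitChar n] := by
  have h0 : n / 10 = 0 := Nat.div_eq_of_lt h
  simp [pvTD, Nat.toDigits, Nat.toDigitsCore, h0, Nat.mod_eq_of_lt h]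

theorem pvTD_step {n : Nat} (h : 10 ≤ n) : pvTD n = pvTD (n / 10) ++ [Nat.digitChar (n % 10)] := by
  have h10 : n / 10 ≠ 0 := by
    intro h0
    have := Nat.lt_of_div_eq_zero (by omega) h0
    omega
  have hlt : n / 10 < n := Nat.div_lt_self (by omega) (by omega)
  have hunfold : ∀ (f n : Nat) (acc : List Char), Nat.toDigitsCore 10 (f + 1) n acc =
      if n / 10 = 0 then Nat.digitChar (n % 10) :: acc
      else Nat.toDigitsCore 10 f (n / 10) (Nat.digitChar (n % 10) :: acc) := by
    intro f n acc
    rfl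
  show Nat.toDigitsCore 10 (n + 1) n [] = _
  rw [hunfold n n [], if_neg h10, pvTdcAppend, pvTdcFuel (n / 10) n (n / 10 + 1) hlt (by omega)]
  rfl

theorem pvTD_ne_nil (n : Nat) : pvTD n ≠ [] := by
  by_cases h : n < 10
  · rw [pvTD_small h]; simp
  · rw [pvTD_step (by omega)]; simp

theorem pvTD_digits : ∀ (n : Nat), ∀ c ∈ pvTD n, ∃ d, d < 10 ∧ c = Nat.digitChar d := by
  intro n
  induction n using Nat.strong_induction_on with
  | _ n ih =>
    intro c hc
    by_cases h : n < 10
    · rw [pvTD_small h] at hc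
      simp at hc
      exact ⟨n, h, hc⟩
    · rw [pvTD_step (by omega)] at hc
      rcases List.mem_append.1 hc with hc | hc
      · exact ih (n / 10) (Nat.div_lt_self (by omega) (by omega)) c hc
      · simp at hc
        exact ⟨n % 10, Nat.mod_lt _ (by omega), hc⟩

theorem pvDigitChar_inj (d e : Nat) (hd : d < 10) (he : e < 10)
    (h : Nat.digitChar d = Nat.digitChar e) : d = e := by
  interval_cases d <;> interval_cases e <;> first | rfl | exact absurd h (by decide)

theorem pvDigitChar_ne_dash (d : Nat) (hd : d < 10) : Nat.digitChar d ≠ '-' := by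
  interval_cases d <;> decide

theorem pvTD_inj : ∀ (n m : Nat), pvTD n = pvTD m → n = m := by
  intro n
  induction n using Nat.strong_induction_on with
  | _ n ih =>
    intro m h
    by_cases hn : n < 10 <;> by_cases hm : m < 10
    · rw [pvTD_small hn, pvTD_small hm] at h
      simp at h
      exact pvDigitChar_inj _ _ hn hm h
    · exfalso
      rw [pvTD_small hn, pvTD_step (by omega)] at h
      have hlen := congrArg List.length h
      simp only [List.length_cons, List.length_nil, List.length_append] at hlen
      have h0 : pvTD (m / 10) = [] := List.eq_nil_of_length_eq_zero (by omega)
      exact pvTD_ne_nil _ h0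
    · exfalso
      rw [pvTD_step (by omega), pvTD_small hm] at h
      have hlen := congrArg List.length h
      simp only [List.length_cons, List.length_nil, List.length_append] at hlen
      have h0 : pvTD (n / 10) = [] := List.eq_nil_of_length_eq_zero (by omega)
      exact pvTD_ne_nil _ h0
    · rw [pvTD_step (show 10 ≤ n by omega), pvTD_step (show 10 ≤ m by omega)] at h
      have h2 := congrArg List.reverse h
      simp only [List.reverse_append, List.reverse_cons, List.reverse_nil, List.nil_append,
        List.singleton_append, List.cons.injEq] at h2
      obtain ⟨hd, htl⟩ := h2
      have hdiv : n / 10 = m / 10 := by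
        have h3 := congrArg List.reverse htl
        simp only [List.reverse_reverse] at h3
        exact ih (n / 10) (Nat.div_lt_self (by omega) (by omega)) _ h3
      have hmod : n % 10 = m % 10 :=
        pvDigitChar_inj _ _ (Nat.mod_lt _ (by omega)) (Nat.mod_lt _ (by omega)) hd
      omega

theorem pvToChars_inj : ∀ a b : Int, PySem.Int.toChars a = PySem.Int.toChars b → a = b := by
  intro a b h
  simp only [PySem.Int.toChars] at h
  split_ifs at h with ha hb hb
  · simp only [List.cons.injEq, true_and] at h
    have := pvTD_inj _ _ h
    omega
  · exfalso
    have hmem : '-' ∈ pvTD b.toNat := by simp only [pvTD]; rw [← h]; simp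
    obtain ⟨d, hd, hc⟩ := pvTD_digits _ _ hmem
    exact pvDigitChar_ne_dash d hd hc.symm
  · exfalso
    have hmem : '-' ∈ pvTD a.toNat := by simp only [pvTD]; rw [h]; simp
    obtain ⟨d, hd, hc⟩ := pvTD_digits _ _ hmem
    exact pvDigitChar_ne_dash d hd hc.symm
  · have := pvTD_inj _ _ h
    omega

theorem pvToStr_inj : ∀ a b : Int, PySem.Int.toStr a = PySem.Int.toStr b → a = b := by
  intro a b h
  have h2 := congrArg String.toList h
  rw [PySem.Int.toList_toStr, PySem.Int.toList_toStr] at h2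
  exact pvToChars_inj a b h2

/- ---------- the greedy occurrence list ---------- -/

-- char-by-char greedy scan for the non-overlapping occurrences of sub (position counter k)
def pvOccs (sub : List Char) : Nat → List Char → Nat → List Nat
  | 0, _, _ => []
  | _+1, [], _ => []
  | fuel+1, h :: rest, k =>
    if sub.isPrefixOf (h :: rest) then
      k :: pvOccs sub fuel ((h :: rest).drop sub.length) (k + sub.length)
    else pvOccs sub fuel rest (k + 1)

theorem pvOccs_fuel (sub : List Char) (hs : sub ≠ []) : ∀ (n : Nat) (l : List Char) (f f' k : Nat),
    l.length ≤ n → l.length ≤ f → l.length ≤ f' → pvOccs sub f l k = pvOccs sub f' l k := by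
  have hlen : 0 < sub.length := List.length_pos_iff.mpr hs
  intro n
  induction n using Nat.strong_induction_on with
  | _ n ih =>
    intro l f f' k hn hf hf'
    cases l with
    | nil => cases f <;> cases f' <;> rfl
    | cons c t =>
      have h1 : t.length + 1 ≤ f := by simpa using hf
      have h1' : t.length + 1 ≤ f' := by simpa using hf'
      obtain ⟨g, rfl⟩ : ∃ g, f = g + 1 := ⟨f - 1, by omega⟩
      obtain ⟨g', rfl⟩ : ∃ g', f' = g' + 1 := ⟨f' - 1, by omega⟩
      have hn1 : t.length + 1 ≤ n := by simpa using hn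
      simp only [pvOccs]
      by_cases hp : sub.isPrefixOf (c :: t)
      · rw [if_pos hp, if_pos hp]
        congr 1
        exact ih (n - 1) (by omega) _ _ _ _ (by simp; omega) (by simp; omega) (by simp; omega)
      · rw [if_neg hp, if_neg hp]
        exact ih (n - 1) (by omega) _ _ _ _ (by omega) (by omega) (by omega)

theorem pvCount_go_eq (sub : List Char) : ∀ (f : Nat) (l : List Char) (acc k : Nat),
    PySem.Chars.count.go sub f l acc = acc + (pvOccs sub f l k).length := by
  intro f
  induction f with
  | zero => intro l acc k; cases l <;> simp [PySem.Chars.count.go, pvOccs]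
  | succ f ih =>
    intro l acc k
    cases l with
    | nil => simp [PySem.Chars.count.go, pvOccs]
    | cons c t =>
      simp only [PySem.Chars.count.go, pvOccs]
      by_cases hp : sub.isPrefixOf (c :: t)
      · rw [if_pos hp, if_pos hp]
        rw [ih _ (acc + 1) (k + sub.length)]
        simp only [List.length_cons]
        omega
      · rw [if_neg hp, if_neg hp]
        exact ih _ _ _

theorem pvFindGo_shift (sub : List Char) : ∀ (l : List Char) (k : Nat),
    PySem.Chars.find.go sub l k =
      if PySem.Chars.find l sub = -1 then -1 else (k : Int) + PySem.Chars.find l sub := by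
  intro l
  induction l with
  | nil =>
    intro k
    by_cases he : sub.isEmpty <;>
      simp [PySem.Chars.find, PySem.Chars.find.go, he]
  | cons c t ih =>
    intro k
    by_cases hp : sub.isPrefixOf (c :: t)
    · simp [PySem.Chars.find, PySem.Chars.find.go, hp]
    · have hstep : ∀ m : Nat, PySem.Chars.find.go sub (c :: t) m = PySem.Chars.find.go sub t (m + 1) := by
        intro m
        simp [PySem.Chars.find.go, hp]
      have hf : PySem.Chars.find (c :: t) sub = PySem.Chars.find.go sub t 1 := by
        simp only [PySem.Chars.find]
        exact hstep 0
      rw [hstep k, ih (k + 1), hf, ih 1]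
      by_cases h1 : PySem.Chars.find t sub = -1
      · simp [h1]
      · have hge : 0 ≤ PySem.Chars.find t sub := by
          have := PySem.Chars.neg_one_le_find t sub
          omega
        rw [if_neg h1, if_neg (by omega), if_neg (by omega)]
        push_cast
        ring

theorem pvOccs_find (sub : List Char) (hs : sub ≠ []) : ∀ (n : Nat) (l : List Char) (f k : Nat),
    l.length ≤ n → l.length ≤ f →
    pvOccs sub f l k =
      if PySem.Chars.find l sub = -1 then []
      else (k + (PySem.Chars.find l sub).toNat) ::
        pvOccs sub f (l.drop ((PySem.Chars.find l sub).toNat + sub.length))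
          (k + (PySem.Chars.find l sub).toNat + sub.length) := by
  have hlen : 0 < sub.length := List.length_pos_iff.mpr hs
  intro n
  induction n using Nat.strong_induction_on with
  | _ n ih =>
    intro l f k hn hf
    cases l with
    | nil =>
      have he : sub.isEmpty = false := by simpa [List.isEmpty_iff] using hs
      have : PySem.Chars.find ([] : List Char) sub = -1 := by
        simp [PySem.Chars.find, PySem.Chars.find.go, he]
      rw [this, if_pos rfl]
      cases f <;> rfl
    | cons c t =>
      obtain ⟨g, rfl⟩ : ∃ g, f = g + 1 := ⟨f - 1, by simp at hf; omega⟩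
      have hn1 : t.length + 1 ≤ n := by simpa using hn
      have hf1 : t.length + 1 ≤ g + 1 := by simpa using hf
      by_cases hp : sub.isPrefixOf (c :: t)
      · have hfind : PySem.Chars.find (c :: t) sub = 0 := by
          simp [PySem.Chars.find, PySem.Chars.find.go, hp]
        rw [hfind, if_neg (by omega)]
        simp only [pvOccs, if_pos hp, Int.toNat_zero, Nat.add_zero, Nat.zero_add]
        congr 1
        exact pvOccs_fuel sub hs n _ _ _ _ (by simp; omega) (by simp; omega) (by simp; omega)
      · have hfind : PySem.Chars.find (c :: t) sub =
            if PySem.Chars.find t sub = -1 then -1 else 1 + PySem.Chars.find t sub := by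
          have hstep0 : PySem.Chars.find.go sub (c :: t) 0 = PySem.Chars.find.go sub t 1 := by
            simp [PySem.Chars.find.go, hp]
          show PySem.Chars.find.go sub (c :: t) 0 = _
          rw [hstep0, pvFindGo_shift sub t 1]
          norm_num
        have hstep : pvOccs sub (g + 1) (c :: t) k = pvOccs sub g t (k + 1) := by
          simp [pvOccs, hp]
        by_cases h1 : PySem.Chars.find t sub = -1
        · rw [hfind, if_pos h1, if_pos rfl, hstep]
          rw [ih (n - 1) (by omega) t g (k + 1) (by omega) (by omega), h1, if_pos rfl]
        · have hge : 0 ≤ PySem.Chars.find t sub := by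
            have := PySem.Chars.neg_one_le_find t sub
            omega
          rw [hfind, if_neg h1, if_neg (by omega : ¬(1 + PySem.Chars.find t sub = -1)), hstep]
          rw [ih (n - 1) (by omega) t g (k + 1) (by omega) (by omega), if_neg h1]
          have htn : (1 + PySem.Chars.find t sub).toNat = (PySem.Chars.find t sub).toNat + 1 := by
            omega
          rw [htn]
          have harg : (PySem.Chars.find t sub).toNat + 1 + sub.length =
              ((PySem.Chars.find t sub).toNat + sub.length) + 1 := by omega
          rw [harg, List.drop_succ_cons]
          congr 1
          · omega
          · have hpos : k + ((PySem.Chars.find t sub).toNat + 1) + sub.length =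
                k + 1 + (PySem.Chars.find t sub).toNat + sub.length := by omega
            rw [hpos]
            exact pvOccs_fuel sub hs n _ _ _ _ (by simp; omega) (by simp; omega) (by simp; omega)

def pvPcond (Gamma : List Int) (len p : Nat) : Bool :=
  Gamma.any fun g => decide ((p : Int) ≤ g ∧ g < (p : Int) + (len : Int))

-- the single value both programs compute for one substring
def pvCond (t s : List Char) (Gamma : List Int) : Bool :=
  (pvOccs s (t.length + 1) t 0).any (pvPcond Gamma s.length)

/- ---------- B side ---------- -/

theorem pvbCovered_eq (t s : List Char) (Gamma : List Int) (hs : s ≠ []) :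
    ∀ (fuel pos : Nat), pos ≤ t.length → t.length - pos < fuel →
    pvbCovered t s Gamma pos fuel =
      (pvOccs s (t.length + 1) (t.drop pos) pos).any (pvPcond Gamma s.length) := by
  have hslen : 0 < s.length := List.length_pos_iff.mpr hs
  intro fuel
  induction fuel with
  | zero => intro pos h1 h2; omega
  | succ fuel ih =>
    intro pos h1 h2
    simp only [pvbCovered]
    rw [PySem.Chars.findFrom_natCast t s pos h1]
    rw [pvOccs_find s hs (t.length + 1) (t.drop pos) (t.length + 1) pos
      (by rw [List.length_drop]; omega) (by rw [List.length_drop]; omega)]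
    by_cases hfind : PySem.Chars.find (t.drop pos) s = -1
    · simp [hfind]
    · have hge : 0 ≤ PySem.Chars.find (t.drop pos) s := by
        have := PySem.Chars.neg_one_le_find (t.drop pos) s
        omega
      set j : Int := PySem.Chars.find (t.drop pos) s with hj
      rw [if_neg hfind, if_neg hfind, if_neg (by omega)]
      have hprefix : s <+: (t.drop pos).drop j.toNat := (PySem.Chars.find_spec (hj ▸ hge)).1
      have hjbound : j.toNat + s.length ≤ t.length - pos := by
        have h3 := hprefix.length_le
        simp only [List.length_drop] at h3
        omega
      have htoNat : ((pos : Int) + j).toNat = pos + j.toNat := by omega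
      have hpc : (Gamma.any fun g =>
            decide ((pos : Int) + j ≤ g ∧ g < (pos : Int) + j + (s.length : Int))) =
          pvPcond Gamma s.length (pos + j.toNat) := by
        simp only [pvPcond]
        congr 1
        funext g
        congr 1
        rw [show ((pos + j.toNat : Nat) : Int) = (pos : Int) + j by omega]
      simp only [List.any_cons, htoNat, hpc]
      by_cases hcov : pvPcond Gamma s.length (pos + j.toNat) = true
      · simp [hcov]
      · simp only [Bool.not_eq_true] at hcov
        rw [if_neg (by simp [hcov]), hcov, Bool.false_or]
        have hdd : (t.drop pos).drop (j.toNat + s.length) = t.drop (pos + j.toNat + s.length) := by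
          rw [List.drop_drop]
          congr 1
          omega
        rw [hdd]
        exact ih (pos + j.toNat + s.length) (by omega) (by omega)

/- ---------- A side ---------- -/

theorem pvFoldl_ignore {α σ : Type} (g : σ → σ) : ∀ (l : List α) (init : σ),
    l.foldl (fun st _ => g st) init = g^[l.length] init := by
  intro l
  induction l with
  | nil => intro init; rfl
  | cons a l ih =>
    intro init
    simp only [List.foldl_cons, List.length_cons, ih]
    rw [Function.iterate_succ_apply]

theorem pvLen_pyRange (n : Nat) : (PySem.List.pyRange 0 (n : Int) 1).length = n := by
  rw [PySem.List.pyRange_of_pos 0 (n : Int) one_pos]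
  by_cases h : (0 : Int) < (n : Int)
  · rw [if_pos h]
    simp
  · rw [if_neg h]
    simp
    omega

-- the loop body of pvBuildIdx
def pvStep (t sub : List Char) (st : Int × Int × List String) : Int × Int × List String :=
  let start := PySem.Chars.findFrom t sub st.2.1 none
  let end_ := start + (sub.length : Int)
  (start, end_, st.2.2 ++ (PySem.List.pyRange start end_ 1).map (fun j => PySem.Int.toStr j))

theorem pvBuild_inv (t sub : List Char) (hs : sub ≠ []) :
    ∀ (os : List Nat) (pos : Nat) (start0 : Int) (idx : List String),
    pos ≤ t.length →
    os = pvOccs sub (t.length + 1) (t.drop pos) pos →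
    ((pvStep t sub)^[os.length] (start0, (pos : Int), idx)).2.2 =
      idx ++ os.flatMap (fun (p : Nat) =>
        (PySem.List.pyRange (p : Int) ((p : Int) + (sub.length : Int)) 1).map
          (fun j => PySem.Int.toStr j)) := by
  have hslen : 0 < sub.length := List.length_pos_iff.mpr hs
  intro os
  induction os with
  | nil => intro pos start0 idx h1 h2; simp
  | cons p os' ih =>
    intro pos start0 idx h1 h2
    rw [pvOccs_find sub hs (t.length + 1) (t.drop pos) (t.length + 1) pos
      (by rw [List.length_drop]; omega) (by rw [List.length_drop]; omega)] at h2
    by_cases hfind : PySem.Chars.find (t.drop pos) sub = -1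
    · rw [if_pos hfind] at h2; exact absurd h2 (by simp)
    · have hge : 0 ≤ PySem.Chars.find (t.drop pos) sub := by
        have := PySem.Chars.neg_one_le_find (t.drop pos) sub
        omega
      set j : Int := PySem.Chars.find (t.drop pos) sub with hj
      rw [if_neg hfind] at h2
      obtain ⟨hp, hos'⟩ := List.cons.injEq .. ▸ h2
      have hprefix : sub <+: (t.drop pos).drop j.toNat := (PySem.Chars.find_spec (hj ▸ hge)).1
      have hjbound : j.toNat + sub.length ≤ t.length - pos := by
        have h3 := hprefix.length_le
        simp only [List.length_drop] at h3
        omega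
      simp only [List.length_cons]
      rw [Function.iterate_succ_apply]
      have hstep : pvStep t sub (start0, (pos : Int), idx) =
          ((pos : Int) + j, ((p + sub.length : Nat) : Int),
            idx ++ (PySem.List.pyRange (p : Int) ((p : Int) + (sub.length : Int)) 1).map
              (fun j => PySem.Int.toStr j)) := by
        simp only [pvStep]
        rw [PySem.Chars.findFrom_natCast t sub pos h1, if_neg hfind, ← hj]
        have hpj : (p : Int) = (pos : Int) + j := by
          rw [hp]; omega
        rw [← hpj]
        have : (p : Int) + (sub.length : Int) = ((p + sub.length : Nat) : Int) := by push_cast; ring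
        rw [this]
      rw [hstep]
      have hdd : (t.drop pos).drop (j.toNat + sub.length) = t.drop (p + sub.length) := by
        rw [List.drop_drop]
        congr 1
        omega
      have hpos' : pos + j.toNat + sub.length = p + sub.length := by omega
      rw [ih (p + sub.length) ((pos : Int) + j)
        (idx ++ (PySem.List.pyRange (p : Int) ((p : Int) + (sub.length : Int)) 1).map
          (fun j => PySem.Int.toStr j))
        (by omega) (by rw [hos', hdd, hpos'])]
      simp [List.flatMap_cons]

theorem pvBuildIdx_eq (t sub : List Char) (hs : sub ≠ []) :
    pvBuildIdx t sub = (pvOccs sub (t.length + 1) t 0).flatMap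
      (fun (p : Nat) => (PySem.List.pyRange (p : Int) ((p : Int) + (sub.length : Int)) 1).map
        (fun j => PySem.Int.toStr j)) := by
  have he : sub.isEmpty = false := by simpa [List.isEmpty_iff] using hs
  have hcnt : PySem.Chars.count t sub = (pvOccs sub (t.length + 1) t 0).length := by
    simp only [PySem.Chars.count, he, Bool.false_eq_true, if_false]
    rw [pvCount_go_eq sub t.length t 0 0]
    rw [pvOccs_fuel sub hs (t.length + 1) t t.length (t.length + 1) 0 (by omega) le_rfl (by omega)]
    omega
  show ((PySem.List.pyRange 0 ((PySem.Chars.count t sub : Nat) : Int) 1).foldl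
      (fun st _ => pvStep t sub st) ((0 : Int), (0 : Int), ([] : List String))).2.2 = _
  rw [pvFoldl_ignore, pvLen_pyRange, hcnt]
  have := pvBuild_inv t sub hs (pvOccs sub (t.length + 1) t 0) 0 0 [] (by omega)
    (by rw [List.drop_zero])
  simpa using this

theorem pvCheck_eq (idx : List String) : ∀ (Gamma : List Int),
    pvCheck idx Gamma = Gamma.any (fun g => idx.contains (PySem.Int.toStr g)) := by
  intro Gamma
  induction Gamma with
  | nil => rfl
  | cons g gs ih =>
    show (if idx.contains (PySem.Int.toStr g) then true else pvCheck idx gs) = _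
    rw [List.any_cons, ← ih]
    cases hc : idx.contains (PySem.Int.toStr g) <;> simp

theorem pvCondA_eq (t sub : List Char) (Gamma : List Int) (hs : sub ≠ []) :
    pvCheck (pvBuildIdx t sub) Gamma = pvCond t sub Gamma := by
  rw [pvCheck_eq, pvBuildIdx_eq t sub hs]
  apply Bool.eq_iff_iff.mpr
  simp only [pvCond, pvPcond, List.any_eq_true, List.contains_iff_exists_mem_beq,
    List.mem_flatMap, List.mem_map, PySem.List.mem_pyRange_one, beq_iff_eq,
    decide_eq_true_eq]
  constructor
  · rintro ⟨g, hg, x, ⟨p, hp, jj, hjj, rfl⟩, hbeq⟩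
    have hje : g = jj := pvToStr_inj g jj hbeq
    refine ⟨p, hp, g, hg, ?_, ?_⟩ <;> omega
  · rintro ⟨p, hp, g, hg, h1, h2⟩
    exact ⟨g, hg, PySem.Int.toStr g, ⟨p, hp, g, ⟨h1, h2⟩, rfl⟩, rfl⟩

theorem pvOuter_eq (d : PySem.Dict (List Char) (List String)) (Gamma : List Int) :
    ∀ (ks : List (List Char)) (acc : Bool),
    pvOuter d Gamma ks acc = (acc && ks.all (fun k => pvCheck (d.getD k []) Gamma)) := by
  intro ks
  induction ks with
  | nil => intro acc; simp [pvOuter]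
  | cons k ks ih =>
    intro acc
    simp only [pvOuter, List.all_cons]
    by_cases h : (acc && pvCheck (d.getD k []) Gamma) = true
    · rw [if_pos h, ih]
      cases acc <;> simp_all
    · rw [if_neg h]
      cases acc <;> simp_all

/- ---------- substring enumeration ---------- -/

def pvSeq (t : List Char) : List (List Char) :=
  (PySem.List.pyRange 0 (t.length : Int) 1).flatMap (fun i =>
    (PySem.List.pyRange i (t.length : Int) 1).map (fun j =>
      PySem.List.slice t (some i) (some (j + 1))))

theorem pvUpdate_flat {α β : Type} [BEq α] (f : β → List α) :
    ∀ (I : List β) (s : PySem.Set α),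
    I.foldl (fun s i => PySem.Set.update s (f i)) s = PySem.Set.update s (I.flatMap f) := by
  intro I
  induction I with
  | nil => intro s; rfl
  | cons i I ih =>
    intro s
    simp only [List.foldl_cons, List.flatMap_cons, ih]
    simp [PySem.Set.update, List.foldl_append]

theorem pvGenSubs_eq (t : List Char) : pvGenSubs t = PySem.Set.ofList (pvSeq t) := by
  show (PySem.List.pyRange 0 (t.length : Int) 1).foldl (fun subs i =>
      (PySem.List.pyRange i (t.length : Int) 1).foldl (fun subs j =>
        PySem.Set.add subs (PySem.List.slice t (some i) (some (j + 1)))) subs) [] = _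
  have hrow : ∀ (i : Int) (subs : PySem.Set (List Char)),
      (PySem.List.pyRange i (t.length : Int) 1).foldl (fun subs j =>
        PySem.Set.add subs (PySem.List.slice t (some i) (some (j + 1)))) subs =
      PySem.Set.update subs ((PySem.List.pyRange i (t.length : Int) 1).map
        (fun j => PySem.List.slice t (some i) (some (j + 1)))) := by
    intro i subs
    rw [PySem.Set.update_map_eq_foldl_add]
  simp only [hrow]
  rw [pvUpdate_flat]
  rw [← PySem.Set.update_empty]
  rfl

theorem pvSeq_mem_ne_nil (t : List Char) : ∀ s ∈ pvSeq t, s ≠ [] := by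
  intro s hsmem
  simp only [pvSeq, List.mem_flatMap, List.mem_map] at hsmem
  obtain ⟨i, hi, j, hj, rfl⟩ := hsmem
  rw [PySem.List.mem_pyRange_one] at hi hj
  apply List.ne_nil_of_length_pos
  rw [PySem.List.length_slice]
  have h1 : PySem.List.clampIdx t.length i = i.toNat := by
    rw [show i = ((i.toNat : Nat) : Int) by omega, PySem.List.clampIdx_natCast]
    omega
  have h2 : PySem.List.clampIdx t.length (j + 1) = j.toNat + 1 := by
    rw [show j + 1 = ((j.toNat + 1 : Nat) : Int) by omega, PySem.List.clampIdx_natCast]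
    omega
  rw [h1, h2]
  omega

theorem pvRange_shift (a b : Int) :
    PySem.List.pyRange (a + 1) (b + 1) 1 = (PySem.List.pyRange a b 1).map (· + 1) := by
  rw [PySem.List.pyRange_of_pos _ _ one_pos, PySem.List.pyRange_of_pos _ _ one_pos,
    List.map_map]
  by_cases h : a < b
  · rw [if_pos (show a + 1 < b + 1 by omega), if_pos h]
    have hcnt : (b + 1 - (a + 1) + 1 - 1) / 1 = (b - a + 1 - 1) / 1 := by
      rw [Int.ediv_one, Int.ediv_one]
      ring
    rw [hcnt]
    congr 1
    funext k
    simp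
    ring
  · rw [if_neg (show ¬(a + 1 < b + 1) by omega), if_neg h]
    simp

theorem pvRow_eq (t : List Char) (i : Int) :
    (PySem.List.pyRange (i + 1) ((t.length : Int) + 1) 1).map
        (fun j => PySem.List.slice t (some i) (some j)) =
      (PySem.List.pyRange i (t.length : Int) 1).map
        (fun j => PySem.List.slice t (some i) (some (j + 1))) := by
  rw [pvRange_shift, List.map_map]
  rfl

theorem pvbInner_eq (t : List Char) (Gamma : List Int) (i : Int) :
    ∀ (js : List Int) (seen : PySem.Set (List Char)),
    (∀ s ∈ seen, pvbCovered t s Gamma 0 (t.length + 1) = true) →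
    (pvbInner t Gamma i js seen =
      (if (js.map (fun j => PySem.List.slice t (some i) (some j))).all
          (fun s => pvbCovered t s Gamma 0 (t.length + 1)) then
        some (PySem.Set.update seen (js.map (fun j => PySem.List.slice t (some i) (some j))))
      else none)) ∧
    ((js.map (fun j => PySem.List.slice t (some i) (some j))).all
        (fun s => pvbCovered t s Gamma 0 (t.length + 1)) = true →
      ∀ s ∈ PySem.Set.update seen (js.map (fun j => PySem.List.slice t (some i) (some j))),
        pvbCovered t s Gamma 0 (t.length + 1) = true) := by
  intro js
  induction js with
  | nil =>
    intro seen hseen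
    exact ⟨rfl, fun _ s hs => hseen s hs⟩
  | cons j js ih =>
    intro seen hseen
    simp only [pvbInner, List.map_cons, List.all_cons]
    by_cases hc : PySem.Set.contains seen (PySem.List.slice t (some i) (some j)) = true
    · have hmem : PySem.List.slice t (some i) (some j) ∈ seen := by
        simpa using hc
      have hcov : pvbCovered t (PySem.List.slice t (some i) (some j)) Gamma 0 (t.length + 1) = true :=
        hseen _ hmem
      have hadd : PySem.Set.add seen (PySem.List.slice t (some i) (some j)) = seen := by
        unfold PySem.Set.add
        rw [if_pos hc]
      have hupd : PySem.Set.update seen (PySem.List.slice t (some i) (some j) ::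
          js.map (fun j => PySem.List.slice t (some i) (some j))) =
          PySem.Set.update seen (js.map (fun j => PySem.List.slice t (some i) (some j))) := by
        show List.foldl PySem.Set.add seen _ = _
        rw [List.foldl_cons, hadd]
        rfl
      rw [if_pos hc, hcov, Bool.true_and, hupd]
      exact ih seen hseen
    · rw [if_neg hc]
      by_cases hcov : pvbCovered t (PySem.List.slice t (some i) (some j)) Gamma 0 (t.length + 1) = true
      · have hseen' : ∀ s ∈ PySem.Set.add seen (PySem.List.slice t (some i) (some j)),
            pvbCovered t s Gamma 0 (t.length + 1) = true := by
          intro s hs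
          rcases (PySem.Set.mem_add seen _ s).1 hs with hs | rfl
          · exact hseen s hs
          · exact hcov
        have hupd : PySem.Set.update seen (PySem.List.slice t (some i) (some j) ::
            js.map (fun j => PySem.List.slice t (some i) (some j))) =
            PySem.Set.update (PySem.Set.add seen (PySem.List.slice t (some i) (some j)))
              (js.map (fun j => PySem.List.slice t (some i) (some j))) := by
          show List.foldl PySem.Set.add seen _ = _
          rw [List.foldl_cons]
          rfl
        rw [if_pos hcov, hcov, Bool.true_and, hupd]
        exact ih _ hseen'
      · simp only [Bool.not_eq_true] at hcov
        rw [if_neg (by simp [hcov]), hcov, Bool.false_and]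
        refine ⟨by simp, ?_⟩
        intro hall
        exact absurd hall (by simp)

theorem pvbOuter_eq (t : List Char) (Gamma : List Int) :
    ∀ (is' : List Int) (seen : PySem.Set (List Char)),
    (∀ s ∈ seen, pvbCovered t s Gamma 0 (t.length + 1) = true) →
    pvbOuter t Gamma is' seen =
      (is'.flatMap (fun i => (PySem.List.pyRange (i + 1) ((t.length : Int) + 1) 1).map
        (fun j => PySem.List.slice t (some i) (some j)))).all
        (fun s => pvbCovered t s Gamma 0 (t.length + 1)) := by
  intro is'
  induction is' with
  | nil => intro seen hseen; rfl
  | cons i is' ih =>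
    intro seen hseen
    simp only [pvbOuter, List.flatMap_cons, List.all_append]
    have hinner := pvbInner_eq t Gamma i
      (PySem.List.pyRange (i + 1) ((t.length : Int) + 1) 1) seen hseen
    by_cases hall : ((PySem.List.pyRange (i + 1) ((t.length : Int) + 1) 1).map
        (fun j => PySem.List.slice t (some i) (some j))).all
        (fun s => pvbCovered t s Gamma 0 (t.length + 1)) = true
    · rw [hinner.1, if_pos hall]
      show pvbOuter t Gamma is' _ = _
      rw [ih _ (hinner.2 hall), hall, Bool.true_and]
    · rw [hinner.1, if_neg hall]
      show false = _
      simp only [Bool.not_eq_true] at hall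
      rw [hall, Bool.false_and]

/- ---------- dictionary ---------- -/

theorem pvDict_keys (t : List Char) (subs : List (List Char)) (h : subs.Nodup) :
    (pvDict t subs).keys = subs := by
  unfold pvDict
  rw [PySem.Dict.keys_foldl_insert subs (fun _ sub => pvBuildIdx t sub) PySem.Dict.empty]
  rw [PySem.Dict.keys_empty]
  rw [show PySem.Set.update ([] : PySem.Set (List Char)) subs = PySem.Set.ofList subs from
    PySem.Set.update_empty subs]
  exact PySem.Set.ofList_eq_self_of_nodup subs h

theorem pvDict_getD (t : List Char) (subs : List (List Char)) (h : subs.Nodup) :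
    ∀ k ∈ subs, (pvDict t subs).getD k [] = pvBuildIdx t k := by
  intro k hk
  have hitems : (pvDict t subs).items =
      PySem.Dict.empty.items ++ subs.map (fun a => (a, pvBuildIdx t a)) := by
    unfold pvDict
    exact PySem.Dict.items_foldl_insert_fresh subs (fun a => a) (fun a => pvBuildIdx t a)
      PySem.Dict.empty (by intro a _; simp [PySem.Dict.contains_empty]) (by simpa using h)
  apply PySem.Dict.getD_of_mem_items
  · rw [hitems]
    have hie : PySem.Dict.empty.items = ([] : List (List Char × List String)) := rfl
    rw [hie, List.nil_append]
    exact List.mem_map.2 ⟨k, hk, rfl⟩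
  · rw [pvDict_keys t subs h]
    exact h

/- ---------- assembly ---------- -/

theorem pvAll_congr {α : Type} (l : List α) (f g : α → Bool)
    (h : ∀ x ∈ l, f x = g x) : l.all f = l.all g := by
  induction l with
  | nil => rfl
  | cons a l ih =>
    simp only [List.all_cons]
    rw [h a (by simp), ih (fun x hx => h x (by simp [hx]))]

theorem pvAll_ofList {α : Type} [BEq α] [LawfulBEq α] (xs : List α) (f : α → Bool) :
    (PySem.Set.ofList xs).all f = xs.all f := by
  apply Bool.eq_iff_iff.mpr
  simp only [List.all_eq_true]
  constructor
  · intro h x hx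
    exact h x ((PySem.Set.mem_ofList xs x).2 hx)
  · intro h x hx
    exact h x ((PySem.Set.mem_ofList xs x).1 hx)

-- ===== VERDICT (by name: the statement is the Claim_ definition above) =====
theorem isAttractor_spec : Claim_equal_isAttractor := by
  intro T Gamma _hdom
  unfold Spec_isAttractor
  show (let t := T.toList
        let d := pvDict t (pvGenSubs t)
        pvOuter d Gamma d.keys true) =
      (let t := T.toList
       pvbOuter t Gamma (PySem.List.pyRange 0 (t.length : Int) 1) PySem.Set.empty)
  simp only []
  set t := T.toList with ht
  have hnodup : (pvGenSubs t).Nodup := by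
    rw [pvGenSubs_eq]
    exact PySem.Set.nodup_ofList (pvSeq t)
  -- A's side
  rw [pvOuter_eq, pvDict_keys t (pvGenSubs t) hnodup, Bool.true_and]
  rw [pvAll_congr (pvGenSubs t) _ (fun s => pvCond t s Gamma) (by
    intro s hsmem
    have hsne : s ≠ [] := by
      apply pvSeq_mem_ne_nil t
      rw [pvGenSubs_eq] at hsmem
      exact (PySem.Set.mem_ofList (pvSeq t) s).1 hsmem
    rw [pvDict_getD t (pvGenSubs t) hnodup s hsmem]
    exact pvCondA_eq t s Gamma hsne)]
  rw [pvGenSubs_eq, pvAll_ofList]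
  -- B's side
  rw [pvbOuter_eq t Gamma _ PySem.Set.empty (by intro s hs; exact absurd hs (by simp [PySem.Set.empty]))]
  have hflat : ((PySem.List.pyRange 0 (t.length : Int) 1).flatMap
      (fun i => (PySem.List.pyRange (i + 1) ((t.length : Int) + 1) 1).map
        (fun j => PySem.List.slice t (some i) (some j)))) = pvSeq t := by
    unfold pvSeq
    congr 1
    funext i
    exact pvRow_eq t i
  rw [hflat]
  apply pvAll_congr
  intro s hsmem
  have hsne : s ≠ [] := pvSeq_mem_ne_nil t s hsmem
  have hcb := pvbCovered_eq t s Gamma hsne (t.length + 1) 0 (by omega) (by omega)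
  rw [List.drop_zero] at hcb
  unfold pvCond
  exact hcb.symm
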